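-- pv_equiv track=rewrite | github.com/AMIVAYUN/codeTestPrac | BaekJoon/17406.py | FullRotate
-- ===== SOURCE A (Python) =====
-- from collections import deque;
--
-- def rotateX( graph, flag ,start, end , dq ):
--
--     #상단
--     if( flag ):
--
--         x, ny = start[ 0 ] , start[ 1 ] + 1;
--         while ny <= end[ 1 ]:
--
--             dq.append( graph[ x ][ ny ] );
--             graph[ x ][ ny ] = dq.popleft();
--             ny += 1;
--     #하단
--     else:
--         x, ny = end[ 0 ], end[ 1 ] - 1;
--         while ny >= start[ 1 ]:
--
--             dq.append( graph[ x ][ ny ] );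
--             graph[ x ][ ny ] = dq.popleft();
--             ny -= 1;
--
--     return graph, dq;
--
-- def rotateY( graph, flag, start, end, dq ):
--
--
--     if( flag ):
--
--         nx, y = start[ 0 ] + 1, end[ 1 ];
--         while nx <= end[ 0 ]:
--
--
--             dq.append( graph[ nx ][ y ] );
--             graph[ nx ][ y ] = dq.popleft();
--             nx += 1;
--     #하단
--     else:
--         nx, y = end[ 0 ] - 1, start[ 1 ];
--         while nx >= start[ 0 ]:
--             dq.append( graph[ nx ][ y ] );
--             graph[ nx ][ y ] = dq.popleft();
--             nx -= 1;
--
--     return graph, dq;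
--
-- def FullRotate( graph, start, end ):
--
--     dq = deque();
--     if( start[ 0 ] ==  end[ 0 ] and start[ 1 ] == end[ 1 ] ):
--         return graph;
--     else:
--         dq.append( graph[ start[ 0 ] ][ start[ 1 ] ] );
--         graph, dq = rotateX( graph, True, start, end, dq );
--         graph, dq = rotateY( graph, True, start, end, dq );
--         graph, dq = rotateX( graph, False, start, end, dq );
--         graph, dq = rotateY( graph, False, start, end, dq );
--
--         return FullRotate( graph, ( start[ 0 ] + 1 , start[ 1 ] + 1 ), ( end[ 0 ] - 1 , end [ 1 ] - 1))
-- ===== SOURCE B (Python) =====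
-- def FullRotate(graph, start, end):
--     # Gather/rotate/scatter per ring, shrinking inward; mutates graph in place like A.
--     sx, sy = start
--     ex, ey = end
--     while (sx, sy) != (ex, ey):
--         path = [(sx, sy)]
--         path += [(sx, y) for y in range(sy + 1, ey + 1)]
--         path += [(x, ey) for x in range(sx + 1, ex + 1)]
--         path += [(ex, y) for y in range(ey - 1, sy - 1, -1)]
--         path += [(x, sy) for x in range(ex - 1, sx, -1)]
--         vals = [graph[x][y] for (x, y) in path]
--         rotated = [vals[-1]] + vals[:-1]
--         for (x, y), v in zip(path, rotated):
--             graph[x][y] = v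
--         sx += 1; sy += 1; ex -= 1; ey -= 1
--     return graph
-- ===== Notes on version B (the rewrite author's own statement) =====
-- stated objective: simpler
-- what changed: Replaced A's recursion with a deque threaded through four index-walking helper functions by a single while loop that, per ring, gathers the perimeter values into a list, rotates that list right by one, and writes it back along the same path.
-- outside the precondition, e.g. on FullRotate([[1, 2], [3, 4]], (-2, -2), (0, 0)): A returns [[1, 2], [3, 4]], B returns [[2, 1], [1, 4]]
import Mathlib
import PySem

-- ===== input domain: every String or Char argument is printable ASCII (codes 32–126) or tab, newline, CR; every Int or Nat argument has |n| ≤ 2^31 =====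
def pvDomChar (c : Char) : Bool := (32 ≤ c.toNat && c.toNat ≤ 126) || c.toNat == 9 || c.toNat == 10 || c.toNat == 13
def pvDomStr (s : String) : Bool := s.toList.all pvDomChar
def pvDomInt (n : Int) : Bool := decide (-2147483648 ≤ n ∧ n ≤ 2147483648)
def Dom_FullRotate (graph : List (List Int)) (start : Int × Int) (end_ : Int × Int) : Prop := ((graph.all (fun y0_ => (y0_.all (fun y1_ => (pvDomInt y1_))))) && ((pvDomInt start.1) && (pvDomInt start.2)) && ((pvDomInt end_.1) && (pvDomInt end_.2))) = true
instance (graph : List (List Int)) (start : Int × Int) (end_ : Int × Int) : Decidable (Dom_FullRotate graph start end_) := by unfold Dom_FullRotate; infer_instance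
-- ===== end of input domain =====

-- B replaces A's recursive deque-carry walk by a per-ring gather/rotate/scatter while-loop.
-- Both Pythons mutate `graph` in place and return it; the theorems are about the return value.

-- shared 2D accessors: graph[i][j] read and write (Python indexing; in range under Pre_)
def get2 (g : List (List Int)) (i j : Int) : Int :=
  PySem.List.pyGetD (PySem.List.pyGetD g i []) j 0

def set2 (g : List (List Int)) (i j : Int) (v : Int) : List (List Int) :=
  PySem.List.pySetD g i (PySem.List.pySetD (PySem.List.pyGetD g i []) j v)

-- ===== PORT A =====
-- loop body of both while loops: dq.append(graph[x][ny]); graph[x][ny] = dq.popleft()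
def dqStep (st : List (List Int) × List Int) (x ny : Int) : List (List Int) × List Int :=
  let dq1 := st.2 ++ [get2 st.1 x ny]
  (set2 st.1 x ny (dq1.headD 0), dq1.tail)

def rotateX (g : List (List Int)) (flag : Bool) (s e : Int × Int) (dq : List Int) :
    List (List Int) × List Int :=
  if flag then
    (PySem.List.pyRange (s.2 + 1) (e.2 + 1) 1).foldl (fun st ny => dqStep st s.1 ny) (g, dq)
  else
    (PySem.List.pyRange (e.2 - 1) (s.2 - 1) (-1)).foldl (fun st ny => dqStep st e.1 ny) (g, dq)

def rotateY (g : List (List Int)) (flag : Bool) (s e : Int × Int) (dq : List Int) :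
    List (List Int) × List Int :=
  if flag then
    (PySem.List.pyRange (s.1 + 1) (e.1 + 1) 1).foldl (fun st nx => dqStep st nx e.2) (g, dq)
  else
    (PySem.List.pyRange (e.1 - 1) (s.1 - 1) (-1)).foldl (fun st nx => dqStep st nx s.2) (g, dq)

def FullRotate (graph : List (List Int)) (start : Int × Int) (end_ : Int × Int) :
    List (List Int) :=
  if start.1 = end_.1 ∧ start.2 = end_.2 then graph
  else if end_.1 ≤ start.1 then graph  -- totality guard: Python raises/diverges here (outside Pre_)
  else
    let dq := [get2 graph start.1 start.2]
    let p1 := rotateX graph true start end_ dq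
    let p2 := rotateY p1.1 true start end_ p1.2
    let p3 := rotateX p2.1 false start end_ p2.2
    let p4 := rotateY p3.1 false start end_ p3.2
    FullRotate p4.1 (start.1 + 1, start.2 + 1) (end_.1 - 1, end_.2 - 1)
termination_by (end_.1 - start.1).toNat
decreasing_by simp_all; omega

-- ===== PORT B =====
def ringPath (s e : Int × Int) : List (Int × Int) :=
  [(s.1, s.2)]
  ++ (PySem.List.pyRange (s.2 + 1) (e.2 + 1) 1).map (fun y => (s.1, y))
  ++ (PySem.List.pyRange (s.1 + 1) (e.1 + 1) 1).map (fun x => (x, e.2))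
  ++ (PySem.List.pyRange (e.2 - 1) (s.2 - 1) (-1)).map (fun y => (e.1, y))
  ++ (PySem.List.pyRange (e.1 - 1) s.1 (-1)).map (fun x => (x, s.2))

def scatter (g : List (List Int)) (ps : List ((Int × Int) × Int)) : List (List Int) :=
  ps.foldl (fun g cv => set2 g cv.1.1 cv.1.2 cv.2) g

def FullRotate_alt (graph : List (List Int)) (start : Int × Int) (end_ : Int × Int) :
    List (List Int) :=
  if start = end_ then graph  -- while-loop exit
  else if end_.1 ≤ start.1 then graph  -- totality guard: Python raises/diverges here (outside Pre_)
  else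
    let path := ringPath start end_
    let vals := path.map (fun c => get2 graph c.1 c.2)
    let rotated := (PySem.List.pyGet? vals (-1)).getD 0 :: PySem.List.slice vals none (some (-1))
    FullRotate_alt (scatter graph (path.zip rotated))
      (start.1 + 1, start.2 + 1) (end_.1 - 1, end_.2 - 1)
termination_by (end_.1 - start.1).toNat
decreasing_by simp_all; omega

-- ===== PRECONDITION & SPEC =====
-- Pre_ = exactly where Python A returns: start == end (immediate return), or an
-- odd-sided square region with nonnegative corners lying inside the graph's rows;
-- on every other input A eventually indexes a row past len(graph) and raises IndexError
-- (non-square or even-sided regions never reach start == end), or, for negative start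
-- indices, Python's negative-index wraparound can alias ring cells (see claim cites).
def Pre_FullRotate (graph : List (List Int)) (start : Int × Int) (end_ : Int × Int) : Prop :=
  start = end_ ∨
  (0 ≤ start.1 ∧ 0 ≤ start.2 ∧ start.1 < end_.1 ∧
   end_.1 - start.1 = end_.2 - start.2 ∧ Even (end_.1 - start.1) ∧
   end_.1 < (graph.length : Int) ∧
   ∀ i : Nat, i < graph.length → start.1 ≤ (i : Int) → (i : Int) ≤ end_.1 →
     end_.2 < ((graph.getD i []).length : Int))
instance (graph : List (List Int)) (start : Int × Int) (end_ : Int × Int) : Decidable (Pre_FullRotate graph start end_) := by unfold Pre_FullRotate; infer_instance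

def pvWitness_FullRotate : List (List Int) × (Int × Int) × (Int × Int) :=
  ([[1, 2, 3], [4, 5, 6], [7, 8, 9]], (0, 0), (2, 2))

def Spec_FullRotate (graph : List (List Int)) (start : Int × Int) (end_ : Int × Int) (out : List (List Int)) : Prop := out = FullRotate_alt graph start end_
instance (graph : List (List Int)) (start : Int × Int) (end_ : Int × Int) (out : List (List Int)) : Decidable (Spec_FullRotate graph start end_ out) := by unfold Spec_FullRotate; infer_instance

-- ===== CLAIM (what is proved, stated in full; the proofs are below) =====
def Claim_equal_FullRotate : Prop := ∀ (graph : List (List Int)) (start : Int × Int) (end_ : Int × Int), Dom_FullRotate graph start end_ → Pre_FullRotate graph start end_ → Spec_FullRotate graph start end_ (FullRotate graph start end_)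

-- ===== LEMMAS AND PROOFS =====

-- cell-level form of the deque loop body
def dqStepC (st : List (List Int) × List Int) (c : Int × Int) : List (List Int) × List Int :=
  dqStep st c.1 c.2

-- nonnegative-coordinate cells
def CellNN (c : Int × Int) : Prop := 0 ≤ c.1 ∧ 0 ≤ c.2

theorem set2_nonneg (g : List (List Int)) {i j : Int} (v : Int) (hi : 0 ≤ i) (hj : 0 ≤ j) :
    set2 g i j v = g.set i.toNat ((g.getD i.toNat []).set j.toNat v) := by
  unfold set2
  rw [PySem.List.pyGetD_of_nonneg _ _ hi, PySem.List.pySetD_of_nonneg _ _ hj,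
    PySem.List.pySetD_of_nonneg _ _ hi]

theorem get2_nonneg (g : List (List Int)) {i j : Int} (hi : 0 ≤ i) (hj : 0 ≤ j) :
    get2 g i j = (g.getD i.toNat []).getD j.toNat 0 := by
  unfold get2
  rw [PySem.List.pyGetD_of_nonneg _ _ hi, PySem.List.pyGetD_of_nonneg _ _ hj]

theorem length_set2 (g : List (List Int)) (i j v : Int) :
    (set2 g i j v).length = g.length := by
  unfold set2; rw [PySem.List.length_pySetD]

theorem rowlen_set2 (g : List (List Int)) {i j : Int} (v : Int) (hi : 0 ≤ i) (hj : 0 ≤ j)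
    (k : Nat) : ((set2 g i j v).getD k []).length = (g.getD k []).length := by
  rw [set2_nonneg g v hi hj, List.getD_eq_getElem?_getD, List.getD_eq_getElem?_getD,
    List.getElem?_set]
  split_ifs with h1 h2
  · subst h1
    simp [List.length_set, List.getD_eq_getElem?_getD, List.getElem?_eq_getElem h2]
  · subst h1
    rw [List.getD_eq_getElem?_getD, List.getElem?_eq_none (by omega)]
  · rfl

theorem get2_set2_ne (g : List (List Int)) (c c' : Int × Int) (v : Int)
    (hc : CellNN c) (hc' : CellNN c') (hne : c ≠ c') :
    get2 (set2 g c.1 c.2 v) c'.1 c'.2 = get2 g c'.1 c'.2 := by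
  obtain ⟨h1, h2⟩ := hc; obtain ⟨h3, h4⟩ := hc'
  rw [set2_nonneg _ _ h1 h2, get2_nonneg _ h3 h4, get2_nonneg _ h3 h4,
    List.getD_eq_getElem?_getD, List.getD_eq_getElem?_getD, List.getElem?_set]
  split_ifs with hr hl
  · have hrow : c.1 = c'.1 := by omega
    have hcol : c.2.toNat ≠ c'.2.toNat := by
      have : c.2 ≠ c'.2 := fun hcv => hne (Prod.ext hrow hcv)
      omega
    simp only [Option.getD_some]
    rw [List.getElem?_set_ne hcol, hr,
      List.getD_eq_getElem?_getD (l := g.getD c'.1.toNat [])]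
  · have hthis : g.getD c'.1.toNat [] = [] := by
      rw [List.getD_eq_getElem?_getD, List.getElem?_eq_none (by omega)]
      rfl
    rw [hthis]
    rfl
  · rfl

theorem set2_comm (g : List (List Int)) (c c' : Int × Int) (v w : Int)
    (hc : CellNN c) (hc' : CellNN c') (hne : c ≠ c') :
    set2 (set2 g c.1 c.2 v) c'.1 c'.2 w = set2 (set2 g c'.1 c'.2 w) c.1 c.2 v := by
  obtain ⟨h1, h2⟩ := hc; obtain ⟨h3, h4⟩ := hc'
  rw [set2_nonneg _ _ h1 h2, set2_nonneg _ _ h3 h4,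
    set2_nonneg _ _ h3 h4, set2_nonneg _ _ h1 h2]
  by_cases hr : c.1.toNat = c'.1.toNat
  · have hrow : c.1 = c'.1 := by omega
    have hcol : c.2.toNat ≠ c'.2.toNat := by
      have : c.2 ≠ c'.2 := fun hcv => hne (Prod.ext hrow hcv)
      omega
    by_cases hlen : c.1.toNat < g.length
    · have e1 : ∀ r : List Int, (g.set c.1.toNat r).getD c'.1.toNat [] = r := by
        intro r
        rw [← hr, List.getD_eq_getElem?_getD, List.getElem?_set_self hlen]
        rfl
      have e2 : ∀ r : List Int, (g.set c'.1.toNat r).getD c.1.toNat [] = r := by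
        intro r
        rw [hr, List.getD_eq_getElem?_getD, List.getElem?_set_self (by omega)]
        rfl
      rw [e1, e2, ← hr, List.set_set, List.set_set, List.set_comm _ _ hcol]
    · have e0 : ∀ r : List Int, g.set c.1.toNat r = g := fun r =>
        List.set_eq_of_length_le (by omega)
      have e0' : ∀ r : List Int, g.set c'.1.toNat r = g := fun r =>
        List.set_eq_of_length_le (by omega)
      simp [e0, e0']
  · have e1 : ∀ r : List Int, (g.set c.1.toNat r).getD c'.1.toNat [] = g.getD c'.1.toNat [] := by
      intro r
      rw [List.getD_eq_getElem?_getD, List.getElem?_set_ne hr, ← List.getD_eq_getElem?_getD]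
    have e2 : ∀ r : List Int, (g.set c'.1.toNat r).getD c.1.toNat [] = g.getD c.1.toNat [] := by
      intro r
      rw [List.getD_eq_getElem?_getD, List.getElem?_set_ne (fun h => hr h.symm),
        ← List.getD_eq_getElem?_getD]
    rw [e1, e2, List.set_comm _ _ hr]

theorem scatter_nil (g : List (List Int)) : scatter g [] = g := rfl

theorem scatter_cons (g : List (List Int)) (p : (Int × Int) × Int)
    (ps : List ((Int × Int) × Int)) :
    scatter g (p :: ps) = scatter (set2 g p.1.1 p.1.2 p.2) ps := rfl

theorem scatter_append (g : List (List Int)) (l1 l2 : List ((Int × Int) × Int)) :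
    scatter g (l1 ++ l2) = scatter (scatter g l1) l2 := List.foldl_append

theorem scatter_set2_comm (ps : List ((Int × Int) × Int)) (g : List (List Int))
    (c : Int × Int) (v : Int) (hc : CellNN c)
    (hps : ∀ p ∈ ps, CellNN p.1) (hnotin : c ∉ ps.map (·.1)) :
    scatter (set2 g c.1 c.2 v) ps = set2 (scatter g ps) c.1 c.2 v := by
  induction ps generalizing g with
  | nil => rfl
  | cons p ps ih =>
    rw [scatter_cons, scatter_cons]
    have hpne : c ≠ p.1 := by
      intro h; exact hnotin (by simp [← h])
    rw [set2_comm g c p.1 v p.2 hc (hps p (by simp)) hpne]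
    exact ih _ (fun q hq => hps q (by simp [hq])) (fun h => hnotin (by simp at h ⊢; right; exact h))

theorem carry_scatter (cs : List (Int × Int)) (g : List (List Int)) (c : Int)
    (hnd : cs.Nodup) (hnn : ∀ p ∈ cs, CellNN p) :
    (cs.foldl dqStepC (g, [c])).1
      = scatter g (cs.zip (c :: cs.map (fun p => get2 g p.1 p.2))) := by
  induction cs generalizing g c with
  | nil => rfl
  | cons p cs ih =>
    have hstep : dqStepC (g, [c]) p = (set2 g p.1 p.2 c, [get2 g p.1 p.2]) := by
      simp [dqStepC, dqStep]
    rw [List.foldl_cons, hstep, List.map_cons, List.zip_cons_cons, scatter_cons]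
    have hmap : cs.map (fun q => get2 (set2 g p.1 p.2 c) q.1 q.2)
        = cs.map (fun q => get2 g q.1 q.2) := by
      apply List.map_congr_left
      intro q hq
      exact get2_set2_ne g p q c (hnn p (by simp)) (hnn q (by simp [hq]))
        (fun h => (List.nodup_cons.mp hnd).1 (h ▸ hq))
    rw [ih _ _ (List.nodup_cons.mp hnd).2 (fun q hq => hnn q (by simp [hq])), hmap]

theorem scatter_length (ps : List ((Int × Int) × Int)) (g : List (List Int)) :
    (scatter g ps).length = g.length := by
  induction ps generalizing g with
  | nil => rfl
  | cons p ps ih => rw [scatter_cons, ih, length_set2]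

theorem scatter_rowlen (ps : List ((Int × Int) × Int)) (g : List (List Int))
    (hps : ∀ p ∈ ps, CellNN p.1) (k : Nat) :
    ((scatter g ps).getD k []).length = (g.getD k []).length := by
  induction ps generalizing g with
  | nil => rfl
  | cons p ps ih =>
    rw [scatter_cons, ih _ (fun q hq => hps q (by simp [hq])),
      rowlen_set2 g p.2 (hps p (by simp)).1 (hps p (by simp)).2 k]

theorem ring_nn (s e : Int × Int) (hs1 : 0 ≤ s.1) (hs2 : 0 ≤ s.2)
    (h1 : s.1 < e.1) (h2 : s.2 < e.2) :
    ∀ p ∈ ringPath s e, CellNN p := by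
  intro p hp
  unfold ringPath at hp
  simp only [List.cons_append, List.nil_append, List.append_assoc, List.mem_cons,
    List.mem_append, List.mem_map, PySem.List.mem_pyRange_one,
    PySem.List.mem_pyRange_neg_one] at hp
  unfold CellNN
  rcases hp with rfl | ⟨y, hy, rfl⟩ | ⟨x, hx, rfl⟩ | ⟨y, hy, rfl⟩ | ⟨x, hx, rfl⟩
  · exact ⟨by show 0 ≤ s.1; omega, by show 0 ≤ s.2; omega⟩
  · exact ⟨by show 0 ≤ s.1; omega, by show 0 ≤ y; omega⟩
  · exact ⟨by show 0 ≤ x; omega, by show 0 ≤ e.2; omega⟩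
  · exact ⟨by show 0 ≤ e.1; omega, by show 0 ≤ y; omega⟩
  · exact ⟨by show 0 ≤ x; omega, by show 0 ≤ s.2; omega⟩

theorem nodup_pyRange_neg_one (a b : Int) : (PySem.List.pyRange a b (-1)).Nodup := by
  rw [PySem.List.pyRange_neg_one_eq_reverse]
  simpa using PySem.List.nodup_pyRange_one (b + 1) (a + 1)

theorem ring_nodup (s e : Int × Int) (h1 : s.1 < e.1) (h2 : s.2 < e.2) :
    (ringPath s e).Nodup := by
  have inj1 : Function.Injective (fun y : Int => (s.1, y)) := by
    intro a b hab; simpa using congrArg Prod.snd hab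
  have inj2 : Function.Injective (fun x : Int => (x, e.2)) := by
    intro a b hab; simpa using congrArg Prod.fst hab
  have inj3 : Function.Injective (fun y : Int => (e.1, y)) := by
    intro a b hab; simpa using congrArg Prod.snd hab
  have inj4 : Function.Injective (fun x : Int => (x, s.2)) := by
    intro a b hab; simpa using congrArg Prod.fst hab
  have hT := List.Nodup.map inj1 (PySem.List.nodup_pyRange_one (s.2 + 1) (e.2 + 1))
  have hR := List.Nodup.map inj2 (PySem.List.nodup_pyRange_one (s.1 + 1) (e.1 + 1))
  have hBo := List.Nodup.map inj3 (nodup_pyRange_neg_one (e.2 - 1) (s.2 - 1))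
  have hL := List.Nodup.map inj4 (nodup_pyRange_neg_one (e.1 - 1) s.1)
  unfold ringPath
  simp only [List.cons_append, List.nil_append, List.append_assoc]
  rw [List.nodup_cons]
  constructor
  · intro hmem
    simp only [List.mem_append, List.mem_map, PySem.List.mem_pyRange_one,
      PySem.List.mem_pyRange_neg_one, Prod.mk.injEq] at hmem
    rcases hmem with ⟨y, hy, h, h'⟩ | ⟨x, hx, h, h'⟩ | ⟨y, hy, h, h'⟩ | ⟨x, hx, h, h'⟩ <;> omega
  · rw [List.nodup_append]
    refine ⟨hT, ?_, ?_⟩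
    · rw [List.nodup_append]
      refine ⟨hR, ?_, ?_⟩
      · rw [List.nodup_append]
        refine ⟨hBo, hL, ?_⟩
        intro a ha b hb
        simp only [List.mem_map, PySem.List.mem_pyRange_neg_one] at ha hb
        obtain ⟨y, hy, rfl⟩ := ha
        obtain ⟨x, hx, rfl⟩ := hb
        intro h; rw [Prod.mk.injEq] at h; omega
      · intro a ha b hb
        simp only [List.mem_append, List.mem_map, PySem.List.mem_pyRange_one,
          PySem.List.mem_pyRange_neg_one] at ha hb
        obtain ⟨x, hx, rfl⟩ := ha
        rcases hb with ⟨y, hy, rfl⟩ | ⟨x2, hx2, rfl⟩ <;>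
          (intro h; rw [Prod.mk.injEq] at h; omega)
    · intro a ha b hb
      simp only [List.mem_append, List.mem_map, PySem.List.mem_pyRange_one,
        PySem.List.mem_pyRange_neg_one] at ha hb
      obtain ⟨y, hy, rfl⟩ := ha
      rcases hb with ⟨x, hx, rfl⟩ | ⟨y2, hy2, rfl⟩ | ⟨x2, hx2, rfl⟩ <;>
        (intro h; rw [Prod.mk.injEq] at h; omega)

-- A's left-column countdown covers B's left column plus the start corner
theorem left_range_split (s e : Int × Int) (h1 : s.1 < e.1) :
    PySem.List.pyRange (e.1 - 1) (s.1 - 1) (-1)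
      = PySem.List.pyRange (e.1 - 1) s.1 (-1) ++ [s.1] := by
  rw [PySem.List.pyRange_neg_one_eq_reverse, PySem.List.pyRange_neg_one_eq_reverse]
  have : (s.1 - 1 + 1) = s.1 := by ring
  rw [this]
  have h3 : (e.1 - 1 + 1) = e.1 := by ring
  rw [h3, PySem.List.pyRange_one_cons h1]
  simp

theorem rotX_true (g : List (List Int)) (s e : Int × Int) (dq : List Int) :
    rotateX g true s e dq
      = (((PySem.List.pyRange (s.2 + 1) (e.2 + 1) 1).map (fun y => (s.1, y))).foldl
          dqStepC (g, dq)) := by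
  rw [List.foldl_map]; rfl

theorem rotX_false (g : List (List Int)) (s e : Int × Int) (dq : List Int) :
    rotateX g false s e dq
      = (((PySem.List.pyRange (e.2 - 1) (s.2 - 1) (-1)).map (fun y => (e.1, y))).foldl
          dqStepC (g, dq)) := by
  rw [List.foldl_map]; rfl

theorem rotY_true (g : List (List Int)) (s e : Int × Int) (dq : List Int) :
    rotateY g true s e dq
      = (((PySem.List.pyRange (s.1 + 1) (e.1 + 1) 1).map (fun x => (x, e.2))).foldl
          dqStepC (g, dq)) := by
  rw [List.foldl_map]; rfl

theorem rotY_false (g : List (List Int)) (s e : Int × Int) (dq : List Int) :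
    rotateY g false s e dq
      = (((PySem.List.pyRange (e.1 - 1) (s.1 - 1) (-1)).map (fun x => (x, s.2))).foldl
          dqStepC (g, dq)) := by
  rw [List.foldl_map]; rfl

-- sequential carry = gather, rotate right by one, scatter (for a closed distinct path)
theorem ring_eq_gen (g : List (List Int)) (h : Int × Int) (t : List (Int × Int))
    (hnd : (h :: t).Nodup) (hnn : ∀ p ∈ h :: t, CellNN p) :
    ((t ++ [h]).foldl dqStepC (g, [get2 g h.1 h.2])).1
      = scatter g ((h :: t).zip
          ((PySem.List.pyGet? ((h :: t).map (fun c => get2 g c.1 c.2)) (-1)).getD 0 ::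
            PySem.List.slice ((h :: t).map (fun c => get2 g c.1 c.2)) none (some (-1)))) := by
  have hndA : (t ++ [h]).Nodup := (List.perm_append_singleton h t).nodup_iff.mpr hnd
  have hnnA : ∀ p ∈ t ++ [h], CellNN p := by
    intro p hp
    exact hnn p ((List.perm_append_singleton h t).mem_iff.mp hp)
  rw [carry_scatter (t ++ [h]) g _ hndA hnnA]
  rw [PySem.List.pyGet?_neg_one, PySem.List.slice_to_neg_one]
  rcases List.eq_nil_or_concat t with rfl | ⟨t', q, rfl⟩
  · simp [scatter_cons, scatter_nil]
  · rw [List.concat_eq_append] at hnd hnn ⊢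
    set f : Int × Int → Int := fun c => get2 g c.1 c.2 with hf
    have hfh : get2 g h.1 h.2 = f h := rfl
    have hmapB : (h :: (t' ++ [q])).map f = (f h :: t'.map f) ++ [f q] := by
      simp
    have zA : (((t' ++ [q]) ++ [h]).zip (f h :: ((t' ++ [q]) ++ [h]).map f))
        = ((t' ++ [q]).zip (f h :: t'.map f)) ++ [(h, f q)] := by
      calc (((t' ++ [q]) ++ [h]).zip (f h :: ((t' ++ [q]) ++ [h]).map f))
          = ((((t' ++ [q]) ++ [h]) ++ []).zip
              (((f h :: t'.map f) ++ [f q]) ++ [f h])) := by simp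
        _ = (((t' ++ [q]) ++ [h]).zip ((f h :: t'.map f) ++ [f q]))
              ++ ([] : List (Int × Int)).zip [f h] := by
              rw [List.zip_append (by simp)]
        _ = (((t' ++ [q]) ++ [h]).zip ((f h :: t'.map f) ++ [f q])) := by simp
        _ = ((t' ++ [q]).zip (f h :: t'.map f)) ++ ([h].zip [f q]) := by
              rw [List.zip_append (by simp)]
        _ = ((t' ++ [q]).zip (f h :: t'.map f)) ++ [(h, f q)] := by simp
    have hlast : ((h :: (t' ++ [q])).map f).getLast?.getD 0 = f q := by
      rw [hmapB, List.getLast?_concat]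
      rfl
    have hdrop : ((h :: (t' ++ [q])).map f).dropLast = f h :: t'.map f := by
      rw [hmapB, List.dropLast_concat]
    rw [hfh, zA, hlast, hdrop, List.zip_cons_cons, scatter_cons, scatter_append,
      scatter_cons, scatter_nil]
    have hZfst : ((t' ++ [q]).zip (f h :: t'.map f)).map (·.1) = t' ++ [q] :=
      List.map_fst_zip (by simp)
    have hnotin : h ∉ ((t' ++ [q]).zip (f h :: t'.map f)).map (·.1) := by
      rw [hZfst]
      exact (List.nodup_cons.mp hnd).1
    have hps : ∀ p ∈ (t' ++ [q]).zip (f h :: t'.map f), CellNN p.1 := by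
      intro p hp
      have : p.1 ∈ ((t' ++ [q]).zip (f h :: t'.map f)).map (·.1) :=
        List.mem_map.mpr ⟨p, hp, rfl⟩
      rw [hZfst] at this
      exact hnn p.1 (List.mem_cons_of_mem h this)
    exact (scatter_set2_comm _ g h (f q) (hnn h List.mem_cons_self) hps hnotin).symm

theorem ring_eq (g : List (List Int)) (s e : Int × Int) (hs1 : 0 ≤ s.1) (hs2 : 0 ≤ s.2)
    (h1 : s.1 < e.1) (h2 : s.2 < e.2) :
    (rotateY (rotateX (rotateY (rotateX g true s e [get2 g s.1 s.2]).1 true s e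
        (rotateX g true s e [get2 g s.1 s.2]).2).1 false s e
        (rotateY (rotateX g true s e [get2 g s.1 s.2]).1 true s e
        (rotateX g true s e [get2 g s.1 s.2]).2).2).1 false s e
        (rotateX (rotateY (rotateX g true s e [get2 g s.1 s.2]).1 true s e
        (rotateX g true s e [get2 g s.1 s.2]).2).1 false s e
        (rotateY (rotateX g true s e [get2 g s.1 s.2]).1 true s e
        (rotateX g true s e [get2 g s.1 s.2]).2).2).2).1
      = scatter g ((ringPath s e).zip
          ((PySem.List.pyGet? ((ringPath s e).map (fun c => get2 g c.1 c.2)) (-1)).getD 0 ::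
            PySem.List.slice ((ringPath s e).map (fun c => get2 g c.1 c.2)) none (some (-1)))) := by
  have hnd := ring_nodup s e h1 h2
  have hnn := ring_nn s e hs1 hs2 h1 h2
  rw [rotX_true, rotY_true, rotX_false, rotY_false]
  simp only [Prod.mk.eta]
  rw [← List.foldl_append, ← List.foldl_append, ← List.foldl_append]
  rw [left_range_split s e h1, List.map_append]
  simp only [List.map_cons, List.map_nil, ← List.append_assoc]
  exact ring_eq_gen g (s.1, s.2) _ hnd hnn

theorem pre_step (g : List (List Int)) (s e : Int × Int) (rot : List Int)
    (hs1 : 0 ≤ s.1) (hs2 : 0 ≤ s.2) (hlt : s.1 < e.1)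
    (hdiag : e.1 - s.1 = e.2 - s.2) (heven : Even (e.1 - s.1))
    (hlen : e.1 < (g.length : Int))
    (hrows : ∀ i : Nat, i < g.length → s.1 ≤ (i : Int) → (i : Int) ≤ e.1 →
      e.2 < ((g.getD i []).length : Int)) :
    Pre_FullRotate (scatter g ((ringPath s e).zip rot))
      (s.1 + 1, s.2 + 1) (e.1 - 1, e.2 - 1) := by
  have hlt2 : s.2 < e.2 := by omega
  have hcells : ∀ p ∈ (ringPath s e).zip rot, CellNN p.1 := by
    intro p hp
    exact ring_nn s e hs1 hs2 hlt hlt2 p.1 (List.of_mem_zip hp).1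
  have hL := scatter_length ((ringPath s e).zip rot) g
  unfold Pre_FullRotate
  by_cases hd2 : e.1 - s.1 = 2
  · left
    exact Prod.ext (by show s.1 + 1 = e.1 - 1; omega) (by show s.2 + 1 = e.2 - 1; omega)
  · right
    obtain ⟨k, hk⟩ := heven
    refine ⟨by show (0:Int) ≤ s.1 + 1; omega, by show (0:Int) ≤ s.2 + 1; omega,
      by show s.1 + 1 < e.1 - 1; omega,
      by show e.1 - 1 - (s.1 + 1) = e.2 - 1 - (s.2 + 1); omega,
      ⟨k - 1, by show e.1 - 1 - (s.1 + 1) = (k - 1) + (k - 1); omega⟩, ?_, ?_⟩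
    · show e.1 - 1 < _
      rw [hL]; omega
    · intro i hi hge hle
      rw [hL] at hi
      rw [scatter_rowlen _ _ hcells i]
      have := hrows i hi (by dsimp only at hge ⊢; omega) (by dsimp only at hle ⊢; omega)
      dsimp only at hle ⊢
      omega

theorem main_lemma : ∀ (graph : List (List Int)) (start end_ : Int × Int),
    Pre_FullRotate graph start end_ → FullRotate graph start end_ = FullRotate_alt graph start end_ := by
  have H : ∀ n (g : List (List Int)) (s e : Int × Int), (e.1 - s.1).toNat < n →
      Pre_FullRotate g s e → FullRotate g s e = FullRotate_alt g s e := by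
    intro n
    induction n with
    | zero => intro g s e hm _; omega
    | succ n ih =>
      intro g s e hm hpre
      by_cases heq : s = e
      · subst heq
        rw [FullRotate, FullRotate_alt]
        rw [if_pos ⟨rfl, rfl⟩, if_pos rfl]
      · have hpre2 := hpre.resolve_left heq
        obtain ⟨hs1, hs2, hlt, hdiag, heven, hlen, hrows⟩ := hpre2
        have hlt2 : s.2 < e.2 := by omega
        rw [FullRotate, FullRotate_alt]
        rw [if_neg (fun hb => heq (Prod.ext hb.1 hb.2)), if_neg heq,
          if_neg (by omega : ¬ e.1 ≤ s.1), if_neg (by omega : ¬ e.1 ≤ s.1)]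
        simp only []
        rw [ring_eq g s e hs1 hs2 hlt hlt2]
        exact ih _ _ _ (by omega)
          (pre_step g s e _ hs1 hs2 hlt hdiag heven hlen hrows)
  intro g s e hpre
  exact H ((e.1 - s.1).toNat + 1) g s e (Nat.lt_succ_self _) hpre

-- ===== VERDICT (by name: the statement is the Claim_ definition above) =====
theorem FullRotate_spec : Claim_equal_FullRotate := by
  intro graph start end_ _ hpre
  unfold Spec_FullRotate
  exact main_lemma graph start end_ hpre
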